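-- pv_equiv track=rewrite | github.com/pypi-data/pypi-mirror-297 | packages/tabeltekstilo/tabeltekstilo-1.1.0.tar.gz/tabeltekstilo-1.1.0/tabeltekstilo/index.py | _format_refs
-- ===== SOURCE A (Python) =====
-- _REF_SEPARATOR = "; "
--
-- _REF_WITH_COUNT_FORMAT = "{ref} ({count})"
--
-- def _format_refs(refs):
--     """
--     format the refs into a string, grouping identical refs.
--     """
--     grouped_refs = []
--     current_ref = refs[0]
--     count = 1
--     # + [None] is to run the loop one extra time since it processes each
--     # element one iteration later.
--     for ref in refs[1:] + [None]:
--         if ref == current_ref: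
--             count += 1
--         else:
--             if count > 1:
--                 grouped_refs.append(
--                     _REF_WITH_COUNT_FORMAT.format(ref=current_ref, count=count)
--                 )
--             else:
--                 grouped_refs.append(current_ref)
--             current_ref = ref
--             count = 1
--     return _REF_SEPARATOR.join(grouped_refs)
-- ===== SOURCE B (Python) =====
-- _REF_SEPARATOR = "; "
--
-- _REF_WITH_COUNT_FORMAT = "{ref} ({count})"
--
--
-- def _format_refs(refs):
--     """
--     format the refs into a string, grouping identical refs.
--     """
--     n = len(refs)
--     bounds = [i for i in range(n) if i == 0 or refs[i] != refs[i - 1]] + [n]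
--     parts = []
--     for s, e in zip(bounds, bounds[1:]):
--         if e - s == 1:
--             parts.append(refs[s])
--         else:
--             parts.append(_REF_WITH_COUNT_FORMAT.format(ref=refs[s], count=e - s))
--     return _REF_SEPARATOR.join(parts)
-- ===== Notes on version B (the rewrite author's own statement) =====
-- stated objective: alternative
-- what changed: Two staged passes replace the current_ref/count state machine with its '+ [None]' sentinel: first a range filter computes the list of run-boundary indices, then each consecutive (start, end) boundary pair is formatted by index arithmetic; Pre_ excludes the empty list, on which A raises IndexError at refs[0].
import Mathlib
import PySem

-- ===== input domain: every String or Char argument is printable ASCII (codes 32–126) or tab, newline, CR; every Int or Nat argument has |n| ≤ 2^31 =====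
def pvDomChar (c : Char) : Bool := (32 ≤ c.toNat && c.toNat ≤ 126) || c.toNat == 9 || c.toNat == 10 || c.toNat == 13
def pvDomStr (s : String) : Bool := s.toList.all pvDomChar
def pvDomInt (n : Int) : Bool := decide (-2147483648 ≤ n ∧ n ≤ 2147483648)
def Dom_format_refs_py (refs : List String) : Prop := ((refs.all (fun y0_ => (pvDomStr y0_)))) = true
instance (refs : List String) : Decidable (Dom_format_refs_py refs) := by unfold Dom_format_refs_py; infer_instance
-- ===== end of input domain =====

-- B replaces A's current_ref/count state machine (with its '+ [None]' sentinel) by two staged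
-- passes: a range filter computing run-boundary indices, then formatting consecutive boundary
-- pairs by index arithmetic; alternative decomposition, same cost.


-- ===== PORT A =====
-- "{ref} ({count})".format(ref=cur, count=c); cur is an Option because the Python loop
-- assigns the None sentinel to current_ref (it is only formatted while it is a string).
def pvFmtA (cur : Option String) (c : Int) : String :=
  cur.getD "" ++ " (" ++ PySem.Int.toStr c ++ ")"

-- the loop 'for ref in refs[1:] + [None]', state (grouped_refs, current_ref, count)
def pvLoopA : List (Option String) → List String → Option String → Int → List String
  | [], grouped, _, _ => grouped
  | ref :: rest, grouped, cur, count =>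
    if ref == cur then
      pvLoopA rest grouped cur (count + 1)
    else
      pvLoopA rest (grouped ++ [if count > 1 then pvFmtA cur count else cur.getD ""]) ref 1

def format_refs_py (refs : List String) : String :=
  match refs with
  | [] => ""   -- Python raises IndexError (refs[0]); excluded by Pre_
  | r :: rest => PySem.Str.join "; " (pvLoopA (rest.map some ++ [none]) [] (some r) 1)

-- ===== PORT B =====
-- the comprehension '[i for i in range(n) if i == 0 or refs[i] != refs[i - 1]]'
def pvStarts (refs : List String) : List Nat :=
  (List.range refs.length).filter (fun i => i == 0 || !(refs.getD i "" == refs.getD (i - 1) ""))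

-- the loop body over a (start, end) boundary pair from zip(bounds, bounds[1:])
def pvPart (refs : List String) (p : Nat × Nat) : String :=
  if p.2 - p.1 == 1 then refs.getD p.1 ""
  else refs.getD p.1 "" ++ " (" ++ PySem.Int.toStr ((p.2 : Int) - (p.1 : Int)) ++ ")"

def format_refs_py_alt (refs : List String) : String :=
  PySem.Str.join "; "
    (((pvStarts refs ++ [refs.length]).zip ((pvStarts refs ++ [refs.length]).drop 1)).map
      (pvPart refs))

-- ===== PRECONDITION & SPEC =====
-- A raises IndexError on the empty list (refs[0]); Pre_ excludes exactly that input.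
def Pre_format_refs_py (refs : List String) : Prop := refs ≠ []
instance (refs : List String) : Decidable (Pre_format_refs_py refs) := by unfold Pre_format_refs_py; infer_instance
def pvWitness_format_refs_py : List String := ["a", "a", "b"]

def Spec_format_refs_py (refs : List String) (out : String) : Prop := out = format_refs_py_alt refs
instance (refs : List String) (out : String) : Decidable (Spec_format_refs_py refs out) := by unfold Spec_format_refs_py; infer_instance

-- ===== CLAIM (what is proved, stated in full; the proofs are below) =====
def Claim_equal_format_refs_py : Prop := ∀ (refs : List String), Dom_format_refs_py refs → Pre_format_refs_py refs → Spec_format_refs_py refs (format_refs_py refs)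

-- ===== LEMMAS AND PROOFS =====

-- proof-side canonical form: the list of (key, run length) of consecutive equal elements
def pvRuns : List String → List (String × Int)
  | [] => []
  | r :: rest =>
    (r, 1 + (rest.takeWhile (· == r)).length) :: pvRuns (rest.dropWhile (· == r))
  termination_by l => l.length
  decreasing_by
    simp only [List.length_cons]
    exact Nat.lt_succ_of_le (List.length_dropWhile_le _ rest)

def pvFmtB (p : String × Int) : String :=
  if p.2 > 1 then p.1 ++ " (" ++ PySem.Int.toStr p.2 ++ ")" else p.1

-- A's loop produces the formatted run for (cur, count + matching prefix) then the runs of the rest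
theorem pvLoopA_eq (rest : List String) :
    ∀ (grouped : List String) (cur : String) (count : Int),
    pvLoopA (rest.map some ++ [none]) grouped (some cur) count =
      grouped ++ pvFmtB (cur, count + (rest.takeWhile (· == cur)).length) ::
        (pvRuns (rest.dropWhile (· == cur))).map pvFmtB := by
  induction rest with
  | nil =>
    intro grouped cur count
    simp [pvLoopA, pvRuns, pvFmtB, pvFmtA]
  | cons x xs ih =>
    intro grouped cur count
    by_cases h : x = cur
    · subst h
      simp only [List.map_cons, List.cons_append, pvLoopA, beq_self_eq_true,
        Option.some.injEq, if_pos, List.takeWhile, List.dropWhile]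
      rw [ih grouped x (count + 1)]
      have : count + 1 + ((xs.takeWhile (· == x)).length : Int)
           = count + ((x :: xs).takeWhile (· == x)).length := by
        simp [List.takeWhile]; ring
      rw [this]
      simp
    · have hbeq : (x == cur) = false := by simp [h]
      simp only [List.map_cons, List.cons_append, pvLoopA]
      rw [if_neg (by simp [h])]
      rw [ih (grouped ++ [if count > 1 then pvFmtA (some cur) count else (some cur).getD ""]) x 1]
      simp only [List.takeWhile_cons, List.dropWhile_cons, hbeq, Bool.false_eq_true, if_false]
      rw [pvRuns]
      simp [pvFmtB, pvFmtA]

-- B's side: the boundary positions > 0, one past each position whose element differs from its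
-- predecessor (the predecessor of position 0 of l being p)
def pvD : String → List String → List Nat
  | _, [] => []
  | p, x :: xs => (if x == p then [] else [0]) ++ (pvD x xs).map (· + 1)

theorem pvD_spec (xs : List String) : ∀ (p : String),
    (List.range xs.length).filter (fun j => !(xs.getD j "" == (p :: xs).getD j "")) = pvD p xs := by
  induction xs with
  | nil => intro p; simp [pvD]
  | cons x tl ih =>
    intro p
    rw [pvD, List.length_cons, List.range_succ_eq_map, List.filter_cons, List.filter_map]
    have hc : ∀ j : Nat, ((fun j => !((x :: tl).getD j "" == (p :: x :: tl).getD j "")) ∘ Nat.succ) j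
        = !(tl.getD j "" == (x :: tl).getD j "") := by
      intro j; simp
    rw [List.filter_congr (fun j _ => by rw [hc j])]
    rw [ih x]
    by_cases h : x = p
    · subst h; simp [Nat.succ_eq_add_one]
    · simp [h, Nat.succ_eq_add_one]

theorem pvStarts_eq (r : String) (rest : List String) :
    pvStarts (r :: rest) = 0 :: (pvD r rest).map (· + 1) := by
  rw [pvStarts, List.length_cons, List.range_succ_eq_map, List.filter_cons, List.filter_map]
  have hc : ∀ j : Nat, ((fun i => (i == 0) || !((r :: rest).getD i "" == (r :: rest).getD (i - 1) "")) ∘ Nat.succ) j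
      = !(rest.getD j "" == (r :: rest).getD j "") := by
    intro j; simp
  rw [List.filter_congr (fun j _ => by rw [hc j])]
  rw [pvD_spec rest r]
  simp [Nat.succ_eq_add_one]

-- the first boundary (or the length, if there is none) is the length of the first run
theorem pvD_headD (xs : List String) : ∀ (r : String),
    (pvD r xs).headD xs.length = (xs.takeWhile (· == r)).length := by
  induction xs with
  | nil => intro r; simp [pvD]
  | cons x tl ih =>
    intro r
    by_cases h : x = r
    · subst h
      rw [pvD, if_pos (by simp)]
      rw [List.takeWhile_cons, if_pos (by simp)]
      simp only [List.nil_append, List.length_cons]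
      cases htl : pvD x tl with
      | nil => have := ih x; rw [htl] at this; simp at this ⊢; omega
      | cons a l => have := ih x; rw [htl] at this; simp at this ⊢; omega
    · rw [pvD, if_neg (by simp [h])]
      rw [List.takeWhile_cons, if_neg (by simp [h])]
      simp

theorem pvPart_shift (v : String) (refs : List String) (a b : Nat) :
    pvPart (v :: refs) (a + 1, b + 1) = pvPart refs (a, b) := by
  simp only [pvPart, List.getD_cons_succ]
  have : (b + 1) - (a + 1) = b - a := by omega
  rw [this]
  have : ((b : Int) + 1) - ((a : Int) + 1) = (b : Int) - (a : Int) := by ring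
  push_cast
  rw [this]

-- main lemma: B's boundary-pair parts are the formatted runs
theorem pvParts_eq_runs (rest : List String) : ∀ (r : String),
    (((0 :: (pvD r rest).map (· + 1)) ++ [rest.length + 1]).zip
      (((0 :: (pvD r rest).map (· + 1)) ++ [rest.length + 1]).drop 1)).map (pvPart (r :: rest))
    = (pvRuns (r :: rest)).map pvFmtB := by
  induction rest with
  | nil =>
    intro r
    rw [pvRuns]
    simp [pvD, pvPart, pvFmtB, pvRuns]
  | cons x xs ih =>
    intro r
    simp only [List.cons_append] at ih ⊢
    by_cases h : x = r
    · subst h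
      specialize ih x
      rw [pvD, if_pos (by simp), List.nil_append]
      have hlen : (x :: xs).length + 1 = xs.length + 1 + 1 := by simp
      rw [hlen, show ((pvD x xs).map (· + 1)).map (· + 1) ++ [xs.length + 1 + 1]
        = (((pvD x xs).map (· + 1)) ++ [xs.length + 1]).map (· + 1) from by simp]
      set T : List Nat := ((pvD x xs).map (· + 1)) ++ [xs.length + 1] with hTdef
      obtain ⟨t0, T', hT0⟩ : ∃ t0 T', T = t0 :: T' := by
        cases hEv : (pvD x xs).map (· + 1) with
        | nil => exact ⟨_, _, by rw [hTdef, hEv]; rfl⟩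
        | cons a l => exact ⟨_, _, by rw [hTdef, hEv]; rfl⟩
      have ht0 : t0 = (xs.takeWhile (· == x)).length + 1 := by
        have hh := pvD_headD xs x
        cases hEv : pvD x xs with
        | nil =>
          rw [hEv] at hh
          have hT0' := hT0
          rw [hTdef, hEv] at hT0'
          simp at hT0' hh
          omega
        | cons a l =>
          rw [hEv] at hh
          have hT0' := hT0
          rw [hTdef, hEv] at hT0'
          simp at hT0' hh
          omega
      rw [hT0] at ih ⊢
      simp only [List.map_cons, List.zip_cons_cons, List.drop_succ_cons, List.drop_zero] at ih ⊢
      rw [show ((t0 + 1) :: T'.map (· + 1)) = (t0 :: T').map (· + 1) from rfl, List.zip_map]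
      simp only [List.map_cons, List.map_map]
      rw [pvRuns] at ih ⊢
      simp only [List.map_cons] at ih
      have htail := (List.cons.injEq _ _ _ _ ▸ ih : _ ∧ _).2
      simp only [List.map_cons]
      congr 1
      · -- heads
        rw [show (List.takeWhile (fun y => y == x) (x :: xs)).length = t0 from by
          rw [List.takeWhile_cons, if_pos (by simp)]; simp [ht0]]
        simp only [pvPart, pvFmtB]
        rw [if_neg (by simp [ht0]), if_pos (by push_cast; omega)]
        have harg : (((0 : Nat), t0 + 1).2 : Int) - (((0 : Nat), t0 + 1).1 : Int)
            = 1 + (t0 : Int) := by push_cast; ring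
        rw [harg]
        simp
      · -- tails
        rw [List.dropWhile_cons, if_pos (by simp)]
        rw [← htail]
        refine List.map_congr_left ?_
        rintro ⟨a, b⟩ _
        exact pvPart_shift x (x :: xs) a b
    · specialize ih x
      rw [pvD, if_neg (by simp [h])]
      have hlen : (x :: xs).length + 1 = xs.length + 1 + 1 := by simp
      rw [hlen]
      have hB : (([0] ++ (pvD x xs).map (· + 1)).map (· + 1)) ++ [xs.length + 1 + 1]
          = ((0 :: ((pvD x xs).map (· + 1) ++ [xs.length + 1])).map (· + 1) : List Nat) := by simp
      rw [hB]
      set T : List Nat := ((pvD x xs).map (· + 1)) ++ [xs.length + 1] with hTdef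
      rw [show ((0 :: T).map (· + 1)) = ((0 : Nat) + 1) :: T.map (· + 1) from rfl]
      simp only [List.zip_cons_cons, List.drop_succ_cons, List.drop_zero] at ih ⊢
      rw [show (((0 : Nat) + 1) :: T.map (· + 1)) = (0 :: T).map (· + 1) from rfl, List.zip_map]
      simp only [List.map_cons, List.map_map]
      rw [pvRuns]
      simp only [List.map_cons]
      congr 1
      · -- heads
        rw [List.takeWhile_cons, if_neg (by simp [h])]
        simp [pvPart, pvFmtB]
      · -- tails
        rw [List.dropWhile_cons, if_neg (by simp [h])]
        rw [← ih]
        refine List.map_congr_left ?_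
        rintro ⟨a, b⟩ _
        exact pvPart_shift r (x :: xs) a b

-- ===== VERDICT (by name: the statement is the Claim_ definition above) =====
theorem format_refs_py_spec : Claim_equal_format_refs_py := by
  intro refs _ hpre
  unfold Spec_format_refs_py
  match refs with
  | [] => exact absurd rfl hpre
  | r :: rest =>
    rw [format_refs_py, format_refs_py_alt, pvStarts_eq]
    rw [show (r :: rest).length = rest.length + 1 from by simp]
    rw [pvParts_eq_runs rest r]
    rw [pvLoopA_eq rest [] r 1, pvRuns]
    simp
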